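-- pv_equiv track=rewrite | github.com/EmilyKolb/happygolucky | Scrypti.py | numsinwords
-- ===== SOURCE A (Python) =====
-- def numsinwords(text,inverted_dict):
--     counter = 0
--     dictcounter = 0
--     zerotenkeys = list(inverted_dict.keys())
--     zerotenvalues = list(inverted_dict.values())
--     newText = ""
--
--     for character in text:
--         counter += 1
--         dictcounter = 0
--         while dictcounter < (len(zerotenkeys)):
--             numword = zerotenkeys[dictcounter]
--             alphaword = zerotenvalues[dictcounter]
--             dictcounter += 1
--
--             if character == numword and text[counter - 2].isalpha():
--                 start = (counter - 1)
--                 end = counter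
--
--                 newText = text[:start] + alphaword + text[end:]
--
--     return(newText)
-- ===== SOURCE B (Python) =====
-- def numsinwords(text, inverted_dict):
--     # Scan from the right for the last position whose character is a key of the
--     # dict and whose preceding character (text[i-1], Python indexing) is alphabetic;
--     # build the output once.  Returns "" when no position qualifies, as A does.
--     for i in range(len(text) - 1, -1, -1):
--         word = inverted_dict.get(text[i])
--         if word is not None and text[i - 1].isalpha():
--             return text[:i] + word + text[i + 1:]
--     return ""
-- ===== Notes on version B (the rewrite author's own statement) =====
-- stated objective: faster
-- what changed: B replaces A's forward loop with a nested scan over all dict keys per character (rebuilding the result string on every hit) by a single right-to-left scan that stops at the first qualifying position using one dict lookup per character and builds the output string once.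
import Mathlib
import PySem

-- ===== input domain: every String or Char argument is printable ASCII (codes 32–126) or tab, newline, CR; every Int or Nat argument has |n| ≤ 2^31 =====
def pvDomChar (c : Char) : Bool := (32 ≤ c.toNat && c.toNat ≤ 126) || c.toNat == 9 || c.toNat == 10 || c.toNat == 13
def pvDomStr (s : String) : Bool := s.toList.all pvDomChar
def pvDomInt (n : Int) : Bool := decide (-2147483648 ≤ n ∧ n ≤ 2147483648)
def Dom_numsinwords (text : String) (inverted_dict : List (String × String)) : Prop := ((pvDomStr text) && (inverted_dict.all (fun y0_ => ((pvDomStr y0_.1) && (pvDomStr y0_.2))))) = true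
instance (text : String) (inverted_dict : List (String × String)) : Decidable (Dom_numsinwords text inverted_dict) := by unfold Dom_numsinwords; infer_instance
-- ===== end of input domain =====

-- B replaces A's per-character scan over all dict keys (rebuilding the string on every hit)
-- by a single right-to-left scan that stops at the first qualifying position (one dict
-- lookup per character, output built once); timing run measured B faster.


-- ===== PORT A =====
-- inner 'while dictcounter < len(zerotenkeys)' loop, iterating over the (key, value) pairs;
-- text[counter-2] is always in range (-1 … len-2) while the outer loop runs, so the getD
-- default of the pyGet? is unreachable.
def pvInnerA (cs : List Char) (counter : Int) (character : Char) :
    List (String × String) → List Char → List Char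
  | [], newText => newText
  | (numword, alphaword) :: rest, newText =>
      pvInnerA cs counter character rest
        (if String.ofList [character] = numword ∧
            ((PySem.Chars.pyGet? cs (counter - 2)).map PySem.Chars.isalpha).getD false = true
         then PySem.Chars.slice cs none (some (counter - 1)) ++ alphaword.toList ++
              PySem.Chars.slice cs (some counter) none
         else newText)

-- one iteration of the outer 'for character in text' loop (state = (counter, newText))
def pvStepA (cs : List Char) (pairs : List (String × String))
    (st : Int × List Char) (character : Char) : Int × List Char :=
  let counter := st.1 + 1
  (counter, pvInnerA cs counter character pairs st.2)

def numsinwords (text : String) (inverted_dict : List (String × String)) : String :=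
  let d := PySem.Dict.ofList inverted_dict
  let zerotenkeys := d.keys
  let zerotenvalues := d.values
  let cs := text.toList
  String.ofList (cs.foldl (pvStepA cs (zerotenkeys.zip zerotenvalues)) ((0 : Int), [])).2

-- ===== PORT B =====
-- text[i-1].isalpha() with Python's negative indexing (i = 0 reads the last character)
def pvPrevAlphaB (cs : List Char) (i : Int) : Bool :=
  ((PySem.Chars.pyGet? cs (i - 1)).map PySem.Chars.isalpha).getD false

-- 'for i in range(len(text)-1, -1, -1)': j+1 handles index i = j; the cs[j]? none branch
-- is a totality guard, unreachable for j < cs.length.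
def pvFindB (cs : List Char) (d : PySem.Dict String String) : Nat → List Char
  | 0 => []
  | j + 1 =>
    match cs[j]? with
    | none => pvFindB cs d j
    | some c =>
      match d.get? (String.ofList [c]) with
      | some word =>
          if pvPrevAlphaB cs (j : Int) then
            cs.take j ++ word.toList ++ cs.drop (j + 1)
          else pvFindB cs d j
      | none => pvFindB cs d j

def numsinwords_alt (text : String) (inverted_dict : List (String × String)) : String :=
  let cs := text.toList
  String.ofList (pvFindB cs (PySem.Dict.ofList inverted_dict) cs.length)

-- ===== PRECONDITION & SPEC =====
def Spec_numsinwords (text : String) (inverted_dict : List (String × String)) (out : String) : Prop := out = numsinwords_alt text inverted_dict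
instance (text : String) (inverted_dict : List (String × String)) (out : String) : Decidable (Spec_numsinwords text inverted_dict out) := by unfold Spec_numsinwords; infer_instance

-- ===== CLAIM (what is proved, stated in full; the proofs are below) =====
def Claim_equal_numsinwords : Prop := ∀ (text : String) (inverted_dict : List (String × String)), Dom_numsinwords text inverted_dict → Spec_numsinwords text inverted_dict (numsinwords text inverted_dict)

-- ===== LEMMAS AND PROOFS =====

-- the inner while-loop over an association list with distinct keys is one dict lookup
lemma pvInnerA_eq (cs : List Char) (counter : Int) (c : Char) :
    ∀ (l : List (String × String)), (l.map Prod.fst).Nodup → ∀ acc,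
      pvInnerA cs counter c l acc =
        match (PySem.Dict.mk l).get? (String.ofList [c]) with
        | some v =>
            if ((PySem.Chars.pyGet? cs (counter - 2)).map PySem.Chars.isalpha).getD false then
              PySem.Chars.slice cs none (some (counter - 1)) ++ v.toList ++
                PySem.Chars.slice cs (some counter) none
            else acc
        | none => acc := by
  intro l
  induction l with
  | nil =>
      intro _ acc
      simp [pvInnerA, PySem.Dict.get?]
  | cons p rest ih =>
      rcases p with ⟨k, v⟩
      intro hnd acc
      simp only [List.map_cons, List.nodup_cons] at hnd
      rw [pvInnerA, ih hnd.2, PySem.Dict.get?_mk_cons]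
      by_cases hk : String.ofList [c] = k
      · have hb : (k == String.ofList [c]) = true := by simp [hk]
        have hnone : (PySem.Dict.mk rest).get? (String.ofList [c]) = none := by
          rw [PySem.Dict.get?_eq_none_iff_not_mem_keys]
          simpa [PySem.Dict.keys, hk] using hnd.1
        simp only [hb, hnone, if_true]
        simp [hk]
      · have hb : (k == String.ofList [c]) = false := by
          simp; exact fun h => hk h.symm
        simp [hb, hk]

-- the outer fold over the first j characters computes B's right-to-left search result
lemma pvFold_take (cs : List Char) (d : PySem.Dict String String) (hnd : d.keys.Nodup) :
    ∀ j, j ≤ cs.length →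
      (cs.take j).foldl (pvStepA cs d.items) ((0 : Int), []) = ((j : Int), pvFindB cs d j) := by
  intro j
  induction j with
  | zero => intro _; simp [pvFindB]
  | succ j ih =>
      intro hj
      have hjlt : j < cs.length := by omega
      have hstep : cs.take (j + 1) = cs.take j ++ [cs[j]] := by
        rw [List.take_add_one]
        simp [List.getElem?_eq_getElem hjlt]
      rw [hstep, List.foldl_append, ih (by omega)]
      simp only [List.foldl_cons, List.foldl_nil]
      have hitems : d.items = (PySem.Dict.mk d.items).items := rfl
      have hnd' : (d.items.map Prod.fst).Nodup := hnd
      rw [pvStepA]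
      have hd : PySem.Dict.mk d.items = d := rfl
      rw [pvInnerA_eq cs ((j : Int) + 1) cs[j] d.items hnd', hd]
      have hc2 : (j : Int) + 1 - 2 = (j : Int) - 1 := by ring
      have hc1 : (j : Int) + 1 - 1 = (j : Int) := by ring
      have hget : cs[j]? = some cs[j] := List.getElem?_eq_getElem hjlt
      have hslice1 : PySem.Chars.slice cs none (some (j : Int)) = cs.take j :=
        PySem.List.slice_to_natCast cs j
      have hslice2 : PySem.Chars.slice cs (some ((j : Int) + 1)) none = cs.drop (j + 1) := by
        have : ((j : Int) + 1) = ((j + 1 : Nat) : Int) := by push_cast; ring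
        rw [this]
        exact PySem.List.slice_from_natCast cs (j + 1)
      rw [pvFindB, hget]
      cases hlook : d.get? (String.ofList [cs[j]]) with
      | none => simp [hlook]
      | some v =>
          simp only [hlook, hc2, hc1, hslice1, hslice2, pvPrevAlphaB]
          simp

-- ===== VERDICT (by name: the statement is the Claim_ definition above) =====
theorem numsinwords_spec : Claim_equal_numsinwords := by
  intro text inverted_dict _
  unfold Spec_numsinwords numsinwords numsinwords_alt
  set d := PySem.Dict.ofList inverted_dict with hd
  set cs := text.toList with hcs
  have hzip : d.keys.zip d.values = d.items := by
    show (d.items.map Prod.fst).zip (d.items.map Prod.snd) = d.items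
    rw [List.zip_map']
    simp
  have hnd : d.keys.Nodup := PySem.Dict.nodup_keys_ofList inverted_dict
  have := pvFold_take cs d hnd cs.length (le_refl _)
  rw [List.take_length] at this
  simp only [hzip, this]
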